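-- pv_equiv track=rewrite | github.com/jrached/6.0001 | 1_ps3/1_ps3/document_distance.py | compute_most_frequent
-- ===== SOURCE A (Python) =====
-- def compute_most_frequent(dict1, dict2):
--     """
--     The keys of dict1 and dict2 are all lowercase,
--     you will NOT need to worry about case sensitivity.
--
--     Args:
--         dict1: frequency dictionary for one text
--         dict2: frequency dictionary for another text
--     Returns:
--         list of the most frequent word(s) in the input dictionaries
--
--     The most frequent word:
--         * is based on the combined word frequencies across both dictionaries.
--           If a word occurs in both dictionaries, consider the sum the
--           freqencies as the combined word frequency.
--         * need not be in both dictionaries, i.e it can be exclusively in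
--           dict1, dict2, or shared by dict1 and dict2.
--     If multiple words are tied (i.e. share the same highest frequency),
--     return an alphabetically ordered list of all these words.
--     """
--
--     dict3 = {}
--
--     for i in dict1.keys():
--         if i in dict2.keys():
--             dict3[i] = dict1[i] + dict2[i]
--         else:
--             dict3[i] = dict1[i]
--
--     for i in dict2.keys():
--         if i not in dict1.keys():
--             dict3[i] = dict2[i]
--
--     most_frequent = 0
--
--     for i in dict3.keys():
--         if dict3[i] > most_frequent:
--             most_frequent = dict3[i]
--
--     my_list = []
--
--     for i in dict3.keys():
--         if dict3[i] == most_frequent: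
--             my_list.append(i)
--
--     return sorted(my_list)
-- ===== SOURCE B (Python) =====
-- def compute_most_frequent(dict1, dict2):
--     # Sum the two frequency dicts, bucket words by combined frequency,
--     # then return the (sorted) bucket of the maximum frequency key.
--     combined = dict(dict1)
--     for w, c in dict2.items():
--         combined[w] = combined.get(w, 0) + c
--     buckets = {}
--     for w, c in combined.items():
--         buckets.setdefault(c, []).append(w)
--     if not buckets:
--         return []
--     return sorted(buckets[max(buckets)])
-- ===== Notes on version B (the rewrite author's own statement) =====
-- stated objective: alternative
-- what changed: B merges the dicts by one-pass dict-summation, then groups words into frequency->words buckets and returns the sorted bucket of the max frequency key, instead of A's find-max-then-rescan-and-filter over the merged dict.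
-- intended difference: On nonempty inputs whose combined frequencies are all negative, A returns [] (its running maximum starts at 0 and no word reaches it) while B returns the words of the true maximum combined frequency, which is the intended 'most frequent word(s)'. — e.g. on compute_most_frequent([("a", -1)], []): A returns [], B returns ["a"]
import Mathlib
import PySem

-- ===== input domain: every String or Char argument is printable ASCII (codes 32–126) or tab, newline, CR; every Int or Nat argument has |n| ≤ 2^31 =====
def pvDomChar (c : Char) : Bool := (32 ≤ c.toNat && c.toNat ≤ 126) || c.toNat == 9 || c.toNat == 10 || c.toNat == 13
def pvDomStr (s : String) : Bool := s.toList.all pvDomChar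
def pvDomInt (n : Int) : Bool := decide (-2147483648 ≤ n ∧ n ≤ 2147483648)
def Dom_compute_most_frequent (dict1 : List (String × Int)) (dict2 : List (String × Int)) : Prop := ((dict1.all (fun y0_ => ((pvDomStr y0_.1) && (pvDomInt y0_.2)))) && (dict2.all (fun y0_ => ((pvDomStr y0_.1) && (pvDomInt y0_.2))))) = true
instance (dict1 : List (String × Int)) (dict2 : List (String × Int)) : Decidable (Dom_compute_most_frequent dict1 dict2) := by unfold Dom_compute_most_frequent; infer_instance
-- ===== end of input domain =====

-- B merges the dicts by one-pass summation and groups words into frequency→words buckets,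
-- returning the sorted bucket of the maximum frequency (alternative decomposition; on
-- nonempty inputs whose combined frequencies are all negative A returns [] while B returns
-- the true most-frequent words — see D_compute_most_frequent below).


-- ===== PORT A =====
-- Literal transliteration of A.  dict1[i] / dict2[i] / dict3[i] are read only at keys i
-- known to be present (i ranges over the dict's own keys), so `getD i 0` is exact there.
def compute_most_frequent (dict1 : List (String × Int)) (dict2 : List (String × Int)) : List String :=
  let d1 := PySem.Dict.ofList dict1
  let d2 := PySem.Dict.ofList dict2
  -- dict3 = {}; for i in dict1.keys(): …
  let dict3 : PySem.Dict String Int :=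
    d1.keys.foldl (fun d i =>
      if d2.contains i then d.insert i (d1.getD i 0 + d2.getD i 0)
      else d.insert i (d1.getD i 0)) PySem.Dict.empty
  -- for i in dict2.keys(): if i not in dict1.keys(): …
  let dict3 :=
    d2.keys.foldl (fun d i =>
      if !(d1.contains i) then d.insert i (d2.getD i 0) else d) dict3
  -- most_frequent = 0; for i in dict3.keys(): …
  let most_frequent : Int :=
    dict3.keys.foldl (fun m i => if dict3.getD i 0 > m then dict3.getD i 0 else m) 0
  -- my_list = []; for i in dict3.keys(): …
  let my_list : List String :=
    dict3.keys.foldl (fun l i => if dict3.getD i 0 == most_frequent then l ++ [i] else l) []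
  PySem.List.sorted my_list (fun x => x)

-- ===== PORT B =====
-- Literal transliteration of B (Source B).  `buckets.setdefault(c, []).append(w)` is
-- `buckets[c] = buckets.get(c, []) + [w]`, i.e. Dict.modify c [] (· ++ [w]).
def compute_most_frequent_alt (dict1 : List (String × Int)) (dict2 : List (String × Int)) : List String :=
  -- combined = dict(dict1); for w, c in dict2.items(): combined[w] = combined.get(w, 0) + c
  let combined : PySem.Dict String Int :=
    (PySem.Dict.ofList dict2).items.foldl
      (fun d p => d.insert p.1 (d.getD p.1 0 + p.2)) (PySem.Dict.ofList dict1)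
  -- buckets = {}; for w, c in combined.items(): buckets.setdefault(c, []).append(w)
  let buckets : PySem.Dict Int (List String) :=
    combined.items.foldl (fun b p => b.modify p.2 [] (· ++ [p.1])) PySem.Dict.empty
  -- if not buckets: return [];  return sorted(buckets[max(buckets)])
  match PySem.List.max? buckets.keys (fun x => x) with
  | none => []
  | some m => PySem.List.sorted (buckets.getD m []) (fun x => x)

-- ===== PRECONDITION & SPEC =====
-- combined frequency of word k across both inputs (dict lookup, 0 when absent)
def pvCombinedVal (dict1 : List (String × Int)) (dict2 : List (String × Int)) (k : String) : Int :=
  (PySem.Dict.ofList dict1).getD k 0 + (PySem.Dict.ofList dict2).getD k 0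

-- On nonempty inputs whose combined frequencies are all negative, A returns [] (its running
-- maximum starts at 0 and no word reaches it) while B returns the words of the true maximum
-- combined frequency, which is the intended "most frequent word(s)".
def D_compute_most_frequent (dict1 : List (String × Int)) (dict2 : List (String × Int)) : Prop :=
  dict1 ++ dict2 ≠ [] ∧ ∀ p ∈ dict1 ++ dict2, pvCombinedVal dict1 dict2 p.1 < 0
instance (dict1 : List (String × Int)) (dict2 : List (String × Int)) : Decidable (D_compute_most_frequent dict1 dict2) := by unfold D_compute_most_frequent; infer_instance

def Spec_compute_most_frequent (dict1 : List (String × Int)) (dict2 : List (String × Int)) (out : List String) : Prop := ¬ D_compute_most_frequent dict1 dict2 → out = compute_most_frequent_alt dict1 dict2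
instance (dict1 : List (String × Int)) (dict2 : List (String × Int)) (out : List String) : Decidable (Spec_compute_most_frequent dict1 dict2 out) := by unfold Spec_compute_most_frequent; infer_instance

def pvDiffWitness_compute_most_frequent : (List (String × Int)) × (List (String × Int)) := ([("a", -1)], [])
def pvDiffWitnessOut_compute_most_frequent : (List String) × (List String) := ([], ["a"])

-- ===== CLAIM (what is proved, stated in full; the proofs are below) =====
def Claim_unchanged_compute_most_frequent : Prop := ∀ (dict1 : List (String × Int)) (dict2 : List (String × Int)), Dom_compute_most_frequent dict1 dict2 → Spec_compute_most_frequent dict1 dict2 (compute_most_frequent dict1 dict2)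
def Claim_changed_compute_most_frequent : Prop := Dom_compute_most_frequent (pvDiffWitness_compute_most_frequent.1) (pvDiffWitness_compute_most_frequent.2) ∧ D_compute_most_frequent (pvDiffWitness_compute_most_frequent.1) (pvDiffWitness_compute_most_frequent.2) ∧ compute_most_frequent (pvDiffWitness_compute_most_frequent.1) (pvDiffWitness_compute_most_frequent.2) = pvDiffWitnessOut_compute_most_frequent.1 ∧ compute_most_frequent_alt (pvDiffWitness_compute_most_frequent.1) (pvDiffWitness_compute_most_frequent.2) = pvDiffWitnessOut_compute_most_frequent.2 ∧ pvDiffWitnessOut_compute_most_frequent.1 ≠ pvDiffWitnessOut_compute_most_frequent.2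
def Claim_exact_compute_most_frequent : Prop := ∀ (dict1 : List (String × Int)) (dict2 : List (String × Int)), Dom_compute_most_frequent dict1 dict2 → D_compute_most_frequent dict1 dict2 → compute_most_frequent dict1 dict2 ≠ compute_most_frequent_alt dict1 dict2

-- ===== LEMMAS AND PROOFS =====
-- ===== proof-side helpers =====
def pvAddOf (l : List (String × Int)) (k : String) : Int :=
  ((l.filter (fun p => p.1 == k)).map Prod.snd).sum

def pvK (dict1 : List (String × Int)) (dict2 : List (String × Int)) : List String :=
  (PySem.Dict.ofList dict1).keys ++
    (PySem.Dict.ofList dict2).keys.filter (fun k => !((PySem.Dict.ofList dict1).contains k))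

def pvL (dict1 : List (String × Int)) (dict2 : List (String × Int)) : List (String × Int) :=
  (pvK dict1 dict2).map (fun k => (k, pvCombinedVal dict1 dict2 k))

lemma pv_keys_eq_map_fst_items (d : PySem.Dict String Int) : d.keys = d.items.map Prod.fst := rfl

lemma pv_mem_keys_ofList (ps : List (String × Int)) (k : String) :
    k ∈ (PySem.Dict.ofList ps).keys ↔ k ∈ ps.map Prod.fst := by
  have h : (PySem.Dict.ofList ps) = ps.foldl (fun d p => d.insert p.1 p.2) PySem.Dict.empty := rfl
  rw [h, PySem.Dict.keys_foldl_insert_key ps Prod.fst (fun _ p => p.2) PySem.Dict.empty,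
    PySem.Dict.keys_empty, PySem.Set.mem_update]
  simp

lemma pv_mem_pvK (dict1 dict2 : List (String × Int)) (k : String) :
    k ∈ pvK dict1 dict2 ↔ k ∈ (dict1 ++ dict2).map Prod.fst := by
  unfold pvK
  rw [List.map_append, List.mem_append, List.mem_append]
  constructor
  · rintro (h | h)
    · exact Or.inl ((pv_mem_keys_ofList dict1 k).mp h)
    · exact Or.inr ((pv_mem_keys_ofList dict2 k).mp (List.mem_filter.mp h).1)
  · rintro (h | h)
    · exact Or.inl ((pv_mem_keys_ofList dict1 k).mpr h)
    · by_cases h1 : (PySem.Dict.ofList dict1).contains k = true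
      · exact Or.inl ((PySem.Dict.contains_iff_mem_keys _ _).mp h1)
      · exact Or.inr (List.mem_filter.mpr ⟨(pv_mem_keys_ofList dict2 k).mpr h, by simp [h1]⟩)

lemma pv_nodup_pvK (dict1 dict2 : List (String × Int)) : (pvK dict1 dict2).Nodup := by
  unfold pvK
  refine List.Nodup.append (PySem.Dict.nodup_keys_ofList dict1)
    (List.Nodup.filter _ (PySem.Dict.nodup_keys_ofList dict2)) ?_
  intro k hk1 hk2
  rcases List.mem_filter.mp hk2 with ⟨_, hc⟩
  have := (PySem.Dict.contains_iff_mem_keys (PySem.Dict.ofList dict1) k).mpr hk1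
  simp [this] at hc

lemma pv_nodup_fst_pvL (dict1 dict2 : List (String × Int)) : ((pvL dict1 dict2).map Prod.fst).Nodup := by
  unfold pvL
  rw [List.map_map]
  have h : (Prod.fst ∘ fun k => (k, pvCombinedVal dict1 dict2 k)) = id := rfl
  rw [h, List.map_id]
  exact pv_nodup_pvK dict1 dict2

-- filter at a key
lemma pv_filter_key_nil {l : List (String × Int)} {k : String}
    (h : k ∉ l.map Prod.fst) : l.filter (fun p => p.1 == k) = [] := by
  refine List.filter_eq_nil_iff.mpr ?_
  intro p hp hpk
  exact h (List.mem_map.mpr ⟨p, hp, by simpa using hpk⟩)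

lemma pv_filter_key_single : ∀ {l : List (String × Int)}, (l.map Prod.fst).Nodup →
    ∀ {k : String} {v : Int}, (k, v) ∈ l → l.filter (fun p => p.1 == k) = [(k, v)] := by
  intro l hl
  induction l with
  | nil => intro k v h; simp at h
  | cons hd tl ih =>
    intro k v h
    simp only [List.map_cons, List.nodup_cons] at hl
    rcases List.mem_cons.mp h with h | h
    · subst h
      rw [List.filter_cons_of_pos (by simp), pv_filter_key_nil hl.1]
    · have hne : hd.1 ≠ k := fun e => hl.1 (e ▸ List.mem_map.mpr ⟨(k, v), h, rfl⟩)
      rw [List.filter_cons_of_neg (by simpa using hne)]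
      exact ih hl.2 h

lemma pv_addOf_items (d : PySem.Dict String Int) (hn : d.keys.Nodup) (k : String) :
    pvAddOf d.items k = if d.contains k = true then d.getD k 0 else 0 := by
  by_cases hc : d.contains k = true
  · rcases List.mem_map.mp ((pv_keys_eq_map_fst_items d) ▸ (PySem.Dict.contains_iff_mem_keys d k).mp hc) with ⟨p, hp, hpk⟩
    have hp' : (k, p.2) ∈ d.items := by rw [← hpk]; simpa using hp
    unfold pvAddOf
    rw [pv_filter_key_single (by rwa [← pv_keys_eq_map_fst_items]) hp']
    simp [hc, PySem.Dict.getD_of_mem_items d hp' hn 0]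
  · have hk : k ∉ d.items.map Prod.fst := by
      rw [← pv_keys_eq_map_fst_items]
      intro h
      exact hc ((PySem.Dict.contains_iff_mem_keys d k).mpr h)
    unfold pvAddOf
    rw [pv_filter_key_nil hk]
    simp [hc]

-- B's merge loop, closed form
lemma pv_mergeB_items : ∀ (l : List (String × Int)) (d : PySem.Dict String Int),
    d.keys.Nodup → (l.map Prod.fst).Nodup →
    (l.foldl (fun d p => d.insert p.1 (d.getD p.1 0 + p.2)) d).items
      = d.items.map (fun q => (q.1, q.2 + pvAddOf l q.1))
        ++ l.filter (fun p => !(d.contains p.1)) := by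
  intro l
  induction l with
  | nil =>
    intro d _ _
    simp [pvAddOf]
  | cons hd tl ih =>
    intro d hd1 hnd
    simp only [List.map_cons, List.nodup_cons] at hnd
    rw [List.foldl_cons]
    by_cases hc : d.contains hd.1 = true
    · rw [ih (d.insert hd.1 (d.getD hd.1 0 + hd.2)) (PySem.Dict.nodup_keys_insert d hd.1 _ hd1) hnd.2]
      rw [PySem.Dict.items_insert]
      rw [if_pos hc]
      rw [List.map_map]
      congr 1
      · refine List.map_congr_left ?_
        intro q hq
        by_cases hqk : q.1 = hd.1
        · have hv : d.getD hd.1 0 = q.2 := by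
            rw [← hqk]
            exact PySem.Dict.getD_of_mem_items d (by rwa [Prod.mk.eta]) hd1 0
          have haddtl : pvAddOf tl hd.1 = 0 := by
            unfold pvAddOf
            rw [pv_filter_key_nil hnd.1]
            rfl
          simp only [Function.comp, hqk]
          rw [if_pos (by simp)]
          unfold pvAddOf
          rw [List.filter_cons_of_pos (by simp)]
          simp [hv]
          ring
        · simp only [Function.comp]
          rw [if_neg (by simpa using hqk)]
          unfold pvAddOf
          rw [List.filter_cons_of_neg (by simpa using fun e => hqk e.symm)]
      · rw [List.filter_cons_of_neg (by simp [hc])]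
        refine List.filter_congr ?_
        intro p hp
        have hpk : p.1 ≠ hd.1 := fun e => hnd.1 (e ▸ List.mem_map.mpr ⟨p, hp, rfl⟩)
        rw [PySem.Dict.contains_insert]
        simp [hpk]
    · rw [ih (d.insert hd.1 (d.getD hd.1 0 + hd.2)) (PySem.Dict.nodup_keys_insert d hd.1 _ hd1) hnd.2]
      rw [PySem.Dict.items_insert, if_neg hc]
      rw [PySem.Dict.getD_of_not_contains d 0 (by simpa using hc)]
      rw [List.map_append]
      have hk : hd.1 ∉ d.keys := fun h => absurd ((PySem.Dict.contains_iff_mem_keys d hd.1).mpr h) hc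
      rw [List.filter_cons_of_pos (by simp [hc])]
      have haddtl : pvAddOf tl hd.1 = 0 := by
        unfold pvAddOf
        rw [pv_filter_key_nil hnd.1]
        rfl
      have h1 : (d.items.map (fun q => (q.1, q.2 + pvAddOf tl q.1)))
          = d.items.map (fun q => (q.1, q.2 + pvAddOf (hd :: tl) q.1)) := by
        refine List.map_congr_left ?_
        intro q hq
        have hqk : q.1 ≠ hd.1 := by
          intro e
          exact hk (e ▸ (pv_keys_eq_map_fst_items d ▸ List.mem_map.mpr ⟨q, hq, rfl⟩))
        unfold pvAddOf
        rw [List.filter_cons_of_neg (by simpa using fun e => hqk e.symm)]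
      have h3 : [(hd.1, 0 + hd.2)].map (fun q => (q.1, q.2 + pvAddOf tl q.1)) = [hd] := by
        simp [haddtl]
      have h4 : tl.filter (fun p => !(d.insert hd.1 (0 + hd.2)).contains p.1)
          = tl.filter (fun p => !(d.contains p.1)) := by
        refine List.filter_congr ?_
        intro p hp
        have hpk : p.1 ≠ hd.1 := fun e => hnd.1 (e ▸ List.mem_map.mpr ⟨p, hp, rfl⟩)
        rw [PySem.Dict.contains_insert]
        simp [hpk]
      rw [h3, h4, ← h1]
      simp
-- A's merged dict has the closed form pvL
lemma pv_mergeA_items (dict1 dict2 : List (String × Int)) :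
    ((PySem.Dict.ofList dict2).keys.foldl
      (fun d i => if !((PySem.Dict.ofList dict1).contains i) then
          d.insert i ((PySem.Dict.ofList dict2).getD i 0) else d)
      ((PySem.Dict.ofList dict1).keys.foldl
        (fun d i => if (PySem.Dict.ofList dict2).contains i then
            d.insert i ((PySem.Dict.ofList dict1).getD i 0 + (PySem.Dict.ofList dict2).getD i 0)
          else d.insert i ((PySem.Dict.ofList dict1).getD i 0)) PySem.Dict.empty)).items
    = pvL dict1 dict2 := by
  set d1 := PySem.Dict.ofList dict1 with hd1
  set d2 := PySem.Dict.ofList dict2 with hd2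
  have hfun : (fun (d : PySem.Dict String Int) i => if d2.contains i then
      d.insert i (d1.getD i 0 + d2.getD i 0) else d.insert i (d1.getD i 0))
      = fun d i => d.insert i (pvCombinedVal dict1 dict2 i) := by
    funext d i
    unfold pvCombinedVal
    rw [← hd1, ← hd2]
    by_cases hc : d2.contains i = true
    · rw [if_pos hc]
    · rw [if_neg hc, PySem.Dict.getD_of_not_contains d2 0 (by simpa using hc), add_zero]
  rw [hfun]
  have hnil : (PySem.Dict.empty : PySem.Dict String Int).items = [] := rfl
  have h1 : (d1.keys.foldl (fun d i => d.insert i (pvCombinedVal dict1 dict2 i)) PySem.Dict.empty).items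
      = d1.keys.map (fun i => (i, pvCombinedVal dict1 dict2 i)) := by
    have h := PySem.Dict.items_foldl_insert_fresh d1.keys (fun i => i)
      (fun i => pvCombinedVal dict1 dict2 i) PySem.Dict.empty
      (fun a _ => PySem.Dict.contains_empty a)
      (by simp [hd1])
    rw [hnil, List.nil_append] at h
    simpa using h
  set M1 := d1.keys.foldl (fun d i => d.insert i (pvCombinedVal dict1 dict2 i)) PySem.Dict.empty with hM1
  have hM1keys : M1.keys = d1.keys := by
    rw [pv_keys_eq_map_fst_items, h1, List.map_map]
    have hcomp : (Prod.fst ∘ fun i => (i, pvCombinedVal dict1 dict2 i)) = id := rfl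
    rw [hcomp, List.map_id]
  rw [← List.foldl_filter]
  have hfresh : ∀ a ∈ d2.keys.filter (fun i => !(d1.contains i)), M1.contains a = false := by
    intro a ha
    rcases List.mem_filter.mp ha with ⟨_, hc⟩
    by_contra h
    have h' : M1.contains a = true := by simpa using h
    have h'' : a ∈ d1.keys := hM1keys ▸ (PySem.Dict.contains_iff_mem_keys M1 a).mp h'
    have := (PySem.Dict.contains_iff_mem_keys d1 a).mpr h''
    simp [this] at hc
  have h2 := PySem.Dict.items_foldl_insert_fresh (d2.keys.filter (fun i => !(d1.contains i)))
    (fun i => i) (fun i => d2.getD i 0) M1 hfresh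
    (by simpa using List.Nodup.filter _ (PySem.Dict.nodup_keys_ofList dict2))
  simp only [] at h2
  rw [h2, h1]
  unfold pvL pvK
  rw [← hd1, ← hd2, List.map_append]
  congr 1
  refine (List.map_congr_left ?_).symm
  intro i hi
  rcases List.mem_filter.mp hi with ⟨_, hc⟩
  have hc1 : d1.contains i = false := by simpa using hc
  unfold pvCombinedVal
  rw [← hd1, ← hd2, PySem.Dict.getD_of_not_contains d1 0 hc1, zero_add]

-- B's merged dict: same closed form
lemma pv_mergeB_items_cv (dict1 dict2 : List (String × Int)) :
    ((PySem.Dict.ofList dict2).items.foldl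
      (fun d p => d.insert p.1 (d.getD p.1 0 + p.2)) (PySem.Dict.ofList dict1)).items
    = pvL dict1 dict2 := by
  set d1 := PySem.Dict.ofList dict1 with hd1
  set d2 := PySem.Dict.ofList dict2 with hd2
  rw [pv_mergeB_items d2.items d1 (PySem.Dict.nodup_keys_ofList dict1)
    (by rw [← pv_keys_eq_map_fst_items]; exact PySem.Dict.nodup_keys_ofList dict2)]
  unfold pvL pvK
  rw [← hd1, ← hd2, List.map_append]
  congr 1
  · rw [PySem.Dict.items_eq_map_keys d1 (PySem.Dict.nodup_keys_ofList dict1) 0, List.map_map]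
    refine List.map_congr_left ?_
    intro k hk
    simp only [Function.comp]
    rw [pv_addOf_items d2 (PySem.Dict.nodup_keys_ofList dict2) k]
    unfold pvCombinedVal
    rw [← hd1, ← hd2]
    by_cases hc : d2.contains k = true
    · rw [if_pos hc]
    · rw [if_neg hc, PySem.Dict.getD_of_not_contains d2 0 (by simpa using hc), add_zero]
  · rw [pv_keys_eq_map_fst_items d2, List.filter_map]
    have hpred : d2.items.filter ((fun k => !(d1.contains k)) ∘ Prod.fst)
        = d2.items.filter (fun p => !(d1.contains p.1)) := rfl
    rw [List.map_map, hpred]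
    have hpt : ∀ p ∈ d2.items.filter (fun p => !(d1.contains p.1)),
        ((fun k => (k, pvCombinedVal dict1 dict2 k)) ∘ Prod.fst) p = id p := by
      intro p hp
      rcases List.mem_filter.mp hp with ⟨hp2, hc⟩
      have hc1 : d1.contains p.1 = false := by simpa using hc
      have hv : d2.getD p.1 0 = p.2 := by
        refine PySem.Dict.getD_of_mem_items d2 ?_ (PySem.Dict.nodup_keys_ofList dict2) 0
        simpa using hp2
      simp only [Function.comp, id]
      unfold pvCombinedVal
      rw [← hd1, ← hd2, PySem.Dict.getD_of_not_contains d1 0 hc1, zero_add, hv]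
    exact ((List.map_congr_left hpt).trans (List.map_id _)).symm
-- fold-max facts
lemma pv_foldl_max_init_le : ∀ (l : List Int) (i : Int), i ≤ l.foldl max i := by
  intro l
  induction l with
  | nil => intro i; simp
  | cons hd tl ih => intro i; exact le_trans (le_max_left i hd) (ih (max i hd))

lemma pv_le_foldl_max : ∀ (l : List Int) (i : Int) {v : Int}, v ∈ l → v ≤ l.foldl max i := by
  intro l
  induction l with
  | nil => intro i v h; simp at h
  | cons hd tl ih =>
    intro i v h
    rcases List.mem_cons.mp h with h | h
    · subst h; exact le_trans (le_max_right i v) (pv_foldl_max_init_le tl _)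
    · exact ih _ h

lemma pv_foldl_max_mem : ∀ (l : List Int) (i : Int), l.foldl max i = i ∨ l.foldl max i ∈ l := by
  intro l
  induction l with
  | nil => intro i; simp
  | cons hd tl ih =>
    intro i
    rcases ih (max i hd) with h | h
    · rw [List.foldl_cons, h]
      rcases max_choice i hd with h' | h'
      · exact Or.inl h'
      · exact Or.inr (by rw [h']; exact List.mem_cons_self ..)
    · exact Or.inr (List.mem_cons_of_mem _ h)

-- A's most_frequent loop over a dict with items L
lemma pv_mostA_eq (L : List (String × Int)) (hn : (L.map Prod.fst).Nodup) :
    (({ items := L } : PySem.Dict String Int)).keys.foldl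
      (fun m i => if ({ items := L } : PySem.Dict String Int).getD i 0 > m
        then ({ items := L } : PySem.Dict String Int).getD i 0 else m) 0
    = (L.map Prod.snd).foldl max 0 := by
  set M : PySem.Dict String Int := { items := L } with hM
  rw [pv_keys_eq_map_fst_items, List.foldl_map, List.foldl_map]
  refine PySem.List.foldl_congr_mem L _ _ 0 ?_
  intro m p hp
  have hv : M.getD p.1 0 = p.2 :=
    PySem.Dict.getD_of_mem_items M (by rwa [Prod.mk.eta]) (by simpa [hM, pv_keys_eq_map_fst_items] using hn) 0
  rw [hv]
  rcases lt_or_ge m p.2 with h | h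
  · rw [if_pos h, max_eq_right (le_of_lt h)]
  · rw [if_neg (not_lt.mpr h), max_eq_left h]

-- A's my_list loop over a dict with items L
lemma pv_myListA_eq (L : List (String × Int)) (hn : (L.map Prod.fst).Nodup) (most : Int) :
    (({ items := L } : PySem.Dict String Int)).keys.foldl
      (fun l i => if ({ items := L } : PySem.Dict String Int).getD i 0 == most
        then l ++ [i] else l) []
    = (L.filter (fun p => p.2 == most)).map Prod.fst := by
  set M : PySem.Dict String Int := { items := L } with hM
  rw [pv_keys_eq_map_fst_items]
  have h := PySem.List.foldl_append_if (fun i => M.getD i 0 == most) (fun i => i) (L.map Prod.fst) []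
  rw [h, List.nil_append, List.filter_map, List.map_map]
  have : L.filter ((fun i => M.getD i 0 == most) ∘ Prod.fst) = L.filter (fun p => p.2 == most) := by
    refine List.filter_congr ?_
    intro p hp
    have hv : M.getD p.1 0 = p.2 :=
      PySem.Dict.getD_of_mem_items M (by rwa [Prod.mk.eta]) (by simpa [hM, pv_keys_eq_map_fst_items] using hn) 0
    simp [Function.comp, hv]
  rw [this]
  rfl

-- B's buckets: keys and lookups
lemma pv_buckets_keys (L : List (String × Int)) :
    (L.foldl (fun b p => b.modify p.2 [] (· ++ [p.1])) (PySem.Dict.empty : PySem.Dict Int (List String))).keys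
    = PySem.Set.update ([] : PySem.Set Int) (L.map Prod.snd) := by
  rw [PySem.Dict.keys_foldl_modify_key L Prod.snd [] (fun _ p => (· ++ [p.1])) PySem.Dict.empty,
    PySem.Dict.keys_empty]

lemma pv_buckets_getD (L : List (String × Int)) (m : Int) :
    (L.foldl (fun b p => b.modify p.2 [] (· ++ [p.1])) (PySem.Dict.empty : PySem.Dict Int (List String))).getD m []
    = (L.filter (fun p => p.2 == m)).map Prod.fst := by
  have hswap : L.foldl (fun b p => b.modify p.2 [] (· ++ [p.1])) (PySem.Dict.empty : PySem.Dict Int (List String))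
      = (L.map (fun p => (p.2, p.1))).foldl (fun b q => b.modify q.1 [] (· ++ [q.2])) PySem.Dict.empty := by
    rw [List.foldl_map]
  rw [hswap, PySem.Dict.getD_foldl_modify_append, PySem.Dict.getD_empty, List.nil_append,
    List.filter_map, List.map_map]
  rfl
-- closed forms of the two ports
lemma pv_A_eq (dict1 dict2 : List (String × Int)) :
    compute_most_frequent dict1 dict2
    = PySem.List.sorted
        (((pvL dict1 dict2).filter
          (fun p => p.2 == ((pvL dict1 dict2).map Prod.snd).foldl max 0)).map Prod.fst)
        (fun x => x) := by
  simp only [compute_most_frequent]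
  have hA : ((PySem.Dict.ofList dict2).keys.foldl
      (fun d i => if !((PySem.Dict.ofList dict1).contains i) then
          d.insert i ((PySem.Dict.ofList dict2).getD i 0) else d)
      ((PySem.Dict.ofList dict1).keys.foldl
        (fun d i => if (PySem.Dict.ofList dict2).contains i then
            d.insert i ((PySem.Dict.ofList dict1).getD i 0 + (PySem.Dict.ofList dict2).getD i 0)
          else d.insert i ((PySem.Dict.ofList dict1).getD i 0)) PySem.Dict.empty))
      = ({ items := pvL dict1 dict2 } : PySem.Dict String Int) :=
    PySem.Dict.ext (pv_mergeA_items dict1 dict2)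
  rw [hA, pv_mostA_eq (pvL dict1 dict2) (pv_nodup_fst_pvL dict1 dict2),
    pv_myListA_eq (pvL dict1 dict2) (pv_nodup_fst_pvL dict1 dict2)]

lemma pv_B_eq (dict1 dict2 : List (String × Int)) :
    compute_most_frequent_alt dict1 dict2
    = (match PySem.List.max? (PySem.Set.update ([] : PySem.Set Int) ((pvL dict1 dict2).map Prod.snd)) (fun x => x) with
      | none => []
      | some m => PySem.List.sorted (((pvL dict1 dict2).filter (fun p => p.2 == m)).map Prod.fst) (fun x => x)) := by
  simp only [compute_most_frequent_alt]
  have hB : ((PySem.Dict.ofList dict2).items.foldl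
      (fun d p => d.insert p.1 (d.getD p.1 0 + p.2)) (PySem.Dict.ofList dict1))
      = ({ items := pvL dict1 dict2 } : PySem.Dict String Int) :=
    PySem.Dict.ext (pv_mergeB_items_cv dict1 dict2)
  rw [hB]
  have hitems : ({ items := pvL dict1 dict2 } : PySem.Dict String Int).items = pvL dict1 dict2 := rfl
  rw [hitems, pv_buckets_keys]
  cases hm : PySem.List.max? (PySem.Set.update ([] : PySem.Set Int) ((pvL dict1 dict2).map Prod.snd)) (fun x => x) with
  | none => rfl
  | some m =>
    simp only []
    rw [pv_buckets_getD]

-- vals and D_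
lemma pv_mem_vals (dict1 dict2 : List (String × Int)) (v : Int) :
    v ∈ (pvL dict1 dict2).map Prod.snd ↔
      ∃ k ∈ (dict1 ++ dict2).map Prod.fst, pvCombinedVal dict1 dict2 k = v := by
  unfold pvL
  rw [List.map_map]
  constructor
  · intro h
    rcases List.mem_map.mp h with ⟨k, hk, he⟩
    exact ⟨k, (pv_mem_pvK dict1 dict2 k).mp hk, by simpa using he⟩
  · rintro ⟨k, hk, he⟩
    exact List.mem_map.mpr ⟨k, (pv_mem_pvK dict1 dict2 k).mpr hk, by simpa using he⟩

lemma pv_L_ne_nil (dict1 dict2 : List (String × Int)) (h : dict1 ++ dict2 ≠ []) :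
    (pvL dict1 dict2).map Prod.snd ≠ [] := by
  rcases List.exists_mem_of_ne_nil _ h with ⟨p, hp⟩
  intro he
  have : pvCombinedVal dict1 dict2 p.1 ∈ (pvL dict1 dict2).map Prod.snd :=
    (pv_mem_vals dict1 dict2 _).mpr ⟨p.1, List.mem_map.mpr ⟨p, hp, rfl⟩, rfl⟩
  rw [he] at this
  exact (List.not_mem_nil).elim this

-- main equivalence outside D_
lemma pv_main (dict1 dict2 : List (String × Int))
    (h : ¬ D_compute_most_frequent dict1 dict2) :
    compute_most_frequent dict1 dict2 = compute_most_frequent_alt dict1 dict2 := by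
  rw [pv_A_eq, pv_B_eq]
  set vals := (pvL dict1 dict2).map Prod.snd with hvals
  by_cases hnil : vals = []
  · have hLnil : pvL dict1 dict2 = [] := by
      cases hL : pvL dict1 dict2 with
      | nil => rfl
      | cons a t => rw [hvals, hL] at hnil; simp at hnil
    rw [hLnil, hnil]
    rfl
  · -- some combined frequency is ≥ 0
    have hne : dict1 ++ dict2 ≠ [] := by
      intro he
      apply hnil
      rw [hvals]
      unfold pvL
      have : pvK dict1 dict2 = [] := by
        rw [List.eq_nil_iff_forall_not_mem]
        intro k hk
        have := (pv_mem_pvK dict1 dict2 k).mp hk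
        rw [he] at this
        simp at this
      rw [this]
      rfl
    have hpos : ∃ v ∈ vals, 0 ≤ v := by
      unfold D_compute_most_frequent at h
      rcases not_and_or.mp h with hc | hc
      · exact absurd hne (by simpa using hc)
      · rcases not_forall.mp hc with ⟨p, hp⟩
        have hpmem : p ∈ dict1 ++ dict2 := by
          by_contra hx
          exact hp (fun hmem => absurd hmem hx)
        have hpv : ¬ pvCombinedVal dict1 dict2 p.1 < 0 := fun hlt => hp (fun _ => hlt)
        exact ⟨pvCombinedVal dict1 dict2 p.1,
          (pv_mem_vals dict1 dict2 _).mpr ⟨p.1, List.mem_map.mpr ⟨p, hpmem, rfl⟩, rfl⟩,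
          not_lt.mp hpv⟩
    rcases hpos with ⟨v0, hv0, hv0pos⟩
    have hupd_ne : PySem.Set.update ([] : PySem.Set Int) vals ≠ [] := by
      intro he
      have : v0 ∈ PySem.Set.update ([] : PySem.Set Int) vals :=
        (PySem.Set.mem_update _ _ _).mpr (Or.inr hv0)
      rw [he] at this
      exact (List.not_mem_nil).elim this
    cases hm : PySem.List.max? (PySem.Set.update ([] : PySem.Set Int) vals) (fun x => x) with
    | none => exact absurd ((PySem.List.max?_eq_none_iff _ _).mp hm) hupd_ne
    | some m =>
      simp only []
      have hmvals : m ∈ vals := by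
        have := PySem.List.max?_mem hm
        rcases (PySem.Set.mem_update _ _ _).mp this with h' | h'
        · exact absurd h' (List.not_mem_nil)
        · exact h'
      have hmax : ∀ v ∈ vals, v ≤ m := by
        intro v hv
        have := PySem.List.max?_isMax hm v ((PySem.Set.mem_update _ _ _).mpr (Or.inr hv))
        simpa using this
      have hmeq : vals.foldl max 0 = m := by
        refine le_antisymm ?_ (pv_le_foldl_max vals 0 hmvals)
        rcases pv_foldl_max_mem vals 0 with h' | h'
        · rw [h']
          exact le_trans hv0pos (hmax v0 hv0)
        · exact hmax _ h'
      rw [hmeq]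

-- inside D_ the two ports always differ
lemma pv_tight (dict1 dict2 : List (String × Int))
    (h : D_compute_most_frequent dict1 dict2) :
    compute_most_frequent dict1 dict2 ≠ compute_most_frequent_alt dict1 dict2 := by
  rcases h with ⟨hne, hneg⟩
  set vals := (pvL dict1 dict2).map Prod.snd with hvals
  have hallneg : ∀ v ∈ vals, v < 0 := by
    intro v hv
    rcases (pv_mem_vals dict1 dict2 v).mp hv with ⟨k, hk, he⟩
    rcases List.mem_map.mp hk with ⟨p, hp, hpk⟩
    have := hneg p hp
    rw [hpk, he] at this
    exact this
  have hA : compute_most_frequent dict1 dict2 = [] := by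
    rw [pv_A_eq]
    have hmost : vals.foldl max 0 = 0 := by
      rcases pv_foldl_max_mem vals 0 with h' | h'
      · exact h'
      · exact absurd (pv_foldl_max_init_le vals 0) (not_le.mpr (hallneg _ h'))
    rw [← hvals, hmost]
    have : (pvL dict1 dict2).filter (fun p => p.2 == (0 : Int)) = [] := by
      refine List.filter_eq_nil_iff.mpr ?_
      intro p hp hp0
      have h2 : p.2 < 0 := hallneg p.2 (by rw [hvals]; exact List.mem_map.mpr ⟨p, hp, rfl⟩)
      have h0 : p.2 = 0 := by simpa using hp0
      omega
    rw [this]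
    rfl
  rw [hA, pv_B_eq]
  have hvalsne : vals ≠ [] := pv_L_ne_nil dict1 dict2 hne
  rcases List.exists_mem_of_ne_nil _ hvalsne with ⟨v0, hv0⟩
  have hupd_ne : PySem.Set.update ([] : PySem.Set Int) vals ≠ [] := by
    intro he
    have : v0 ∈ PySem.Set.update ([] : PySem.Set Int) vals :=
      (PySem.Set.mem_update _ _ _).mpr (Or.inr hv0)
    rw [he] at this
    exact (List.not_mem_nil).elim this
  cases hm : PySem.List.max? (PySem.Set.update ([] : PySem.Set Int) vals) (fun x => x) with
  | none => exact absurd ((PySem.List.max?_eq_none_iff _ _).mp hm) hupd_ne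
  | some m =>
    simp only []
    have hmvals : m ∈ vals := by
      have := PySem.List.max?_mem hm
      rcases (PySem.Set.mem_update _ _ _).mp this with h' | h'
      · exact absurd h' (List.not_mem_nil)
      · exact h'
    rcases List.mem_map.mp (hvals ▸ hmvals) with ⟨q, hq, hqm⟩
    intro heq
    have hlen : (PySem.List.sorted (((pvL dict1 dict2).filter (fun p => p.2 == m)).map Prod.fst) (fun x => x)).length = 0 := by
      rw [← heq]
      rfl
    rw [PySem.List.length_sorted, List.length_map] at hlen
    have : q ∈ (pvL dict1 dict2).filter (fun p => p.2 == m) :=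
      List.mem_filter.mpr ⟨hq, by simpa using hqm⟩
    rw [List.eq_nil_of_length_eq_zero hlen] at this
    exact (List.not_mem_nil).elim this

-- ===== VERDICT (by name: the statement is the Claim_ definition above) =====
theorem compute_most_frequent_spec : Claim_unchanged_compute_most_frequent := by
  intro dict1 dict2 _ hD
  exact pv_main dict1 dict2 hD
theorem compute_most_frequent_changed : Claim_changed_compute_most_frequent := by
  unfold Claim_changed_compute_most_frequent; decide
theorem compute_most_frequent_tight : Claim_exact_compute_most_frequent := by
  intro dict1 dict2 _ hD
  exact pv_tight dict1 dict2 hD
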